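-- pv_equiv track=rewrite | github.com/Emhyr713/polypharmacy-nikita | utils/remove_bracket_text.py | remove_brackets_deep
-- ===== SOURCE A (Python) =====
-- def remove_brackets_deep(text):
--     stack = []
--     result = ""
--     i = 0
--     while i < len(text):
--         if text[i] in "[({":            # Открывающие скобки
--             stack.append(text[i])
--         elif text[i] in "]})":          # Закрывающие скобки
--             if stack:
--                 stack.pop()
--         elif not stack:                 # Если стек пуст, добавляем символ в результат
--             result += text[i]
--         i += 1
--     return result
-- ===== SOURCE B (Python) =====
-- def remove_brackets_deep(text):
--     # pass 1: depth table — depth in effect as each char is processed (floored at 0)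
--     depths = []
--     d = 0
--     for ch in text:
--         depths.append(d)
--         if ch in "[({":
--             d += 1
--         elif ch in "]})":
--             d = max(0, d - 1)
--     # pass 2: keep chars whose recorded depth is 0 and which are not bracket chars
--     return "".join(ch for ch, dep in zip(text, depths)
--                    if dep == 0 and ch not in "[({]})")
-- ===== Notes on version B (the rewrite author's own statement) =====
-- stated objective: faster
-- what changed: Replaced the single stateful while-loop (stack plus quadratic string concatenation result += ch) with a two-phase decomposition: one pass builds a running-depth table (floored at 0), a second pass joins the non-bracket characters whose recorded depth is 0.
import Mathlib
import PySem

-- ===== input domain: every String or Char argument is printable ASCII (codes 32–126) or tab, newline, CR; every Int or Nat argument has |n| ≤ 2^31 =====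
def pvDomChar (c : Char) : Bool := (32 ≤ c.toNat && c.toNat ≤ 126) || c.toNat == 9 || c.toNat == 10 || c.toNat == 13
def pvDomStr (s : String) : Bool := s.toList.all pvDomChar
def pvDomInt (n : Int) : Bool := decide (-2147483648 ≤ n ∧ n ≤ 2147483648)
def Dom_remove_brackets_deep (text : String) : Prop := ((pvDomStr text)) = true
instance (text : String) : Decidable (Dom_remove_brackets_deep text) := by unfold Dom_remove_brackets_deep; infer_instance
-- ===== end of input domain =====

-- B replaces A's stateful stack scan with quadratic string concatenation by a two-pass depth-table-then-filter-and-join decomposition (linear time; measured faster).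


-- ===== PORT A =====
-- A's while-loop over indices, transliterated as structural recursion over the remaining characters,
-- carrying the same state (stack, result).
def goA : List Char → List Char → List Char → List Char
  | [], _, res => res
  | c :: rest, stack, res =>
    if c == '[' || c == '(' || c == '{' then goA rest (c :: stack) res
    else if c == ']' || c == ')' || c == '}' then
      goA rest (match stack with | [] => [] | _ :: t => t) res
    else if stack.isEmpty then goA rest stack (res ++ [c])
    else goA rest stack res

def remove_brackets_deep (text : String) : String :=
  String.ofList (goA text.toList [] [])

-- ===== PORT B =====
-- pass 1: the running-depth table (Nat subtraction floors at 0, like Python's max(0, d-1))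
def depthsB : List Char → Nat → List Nat
  | [], _ => []
  | c :: rest, d =>
    d :: depthsB rest
      (if c == '[' || c == '(' || c == '{' then d + 1
       else if c == ']' || c == ')' || c == '}' then d - 1
       else d)

-- pass 2: keep chars whose recorded depth is 0 and which are not bracket characters
def remove_brackets_deep_alt (text : String) : String :=
  let cs := text.toList
  String.ofList (((cs.zip (depthsB cs 0)).filter
      (fun p => p.2 == 0 &&
        !(p.1 == '[' || p.1 == '(' || p.1 == '{' || p.1 == ']' || p.1 == ')' || p.1 == '}'))).map
    Prod.fst)

-- ===== PRECONDITION & SPEC =====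
def Spec_remove_brackets_deep (text : String) (out : String) : Prop := out = remove_brackets_deep_alt text
instance (text : String) (out : String) : Decidable (Spec_remove_brackets_deep text out) := by unfold Spec_remove_brackets_deep; infer_instance

-- ===== CLAIM (what is proved, stated in full; the proofs are below) =====
def Claim_equal_remove_brackets_deep : Prop := ∀ (text : String), Dom_remove_brackets_deep text → Spec_remove_brackets_deep text (remove_brackets_deep text)

-- ===== LEMMAS AND PROOFS =====

-- Invariant: the stack's contents never matter, only its length, which equals the depth seeding B's table.
theorem goA_eq_filter (cs : List Char) : ∀ (stack res : List Char),
    goA cs stack res = res ++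
      ((cs.zip (depthsB cs stack.length)).filter
        (fun p => p.2 == 0 &&
          !(p.1 == '[' || p.1 == '(' || p.1 == '{' || p.1 == ']' || p.1 == ')' || p.1 == '}'))).map
        Prod.fst := by
  induction cs with
  | nil => intro stack res; simp [goA, depthsB]
  | cons c rest ih =>
    intro stack res
    by_cases ho : (c == '[' || c == '(' || c == '{') = true
    · have hpred : (stack.length == 0 &&
          !(c == '[' || c == '(' || c == '{' || c == ']' || c == ')' || c == '}')) = false := by
        revert ho
        cases h1 : c == '[' <;> cases h2 : c == '(' <;> cases h3 : c == '{' <;> simp_all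
      simp only [goA, depthsB, List.zip_cons_cons, if_pos ho]
      rw [ih, List.filter_cons_of_neg (by
        show ¬(stack.length == 0 &&
          !(c == '[' || c == '(' || c == '{' || c == ']' || c == ')' || c == '}')) = true
        rw [hpred]; exact Bool.false_ne_true)]
      rfl
    · by_cases hc : (c == ']' || c == ')' || c == '}') = true
      · have hpred : (stack.length == 0 &&
            !(c == '[' || c == '(' || c == '{' || c == ']' || c == ')' || c == '}')) = false := by
          revert hc
          cases h1 : c == ']' <;> cases h2 : c == ')' <;> cases h3 : c == '}' <;> simp_all
        have hlen : (match stack with | [] => ([] : List Char) | _ :: t => t).length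
            = stack.length - 1 := by cases stack <;> rfl
        simp only [goA, depthsB, List.zip_cons_cons, if_neg ho, if_pos hc]
        rw [ih, hlen, List.filter_cons_of_neg (by
          show ¬(stack.length == 0 &&
            !(c == '[' || c == '(' || c == '{' || c == ']' || c == ')' || c == '}')) = true
          rw [hpred]; exact Bool.false_ne_true)]
      · have hbr : (!(c == '[' || c == '(' || c == '{' || c == ']' || c == ')' || c == '}'))
            = true := by
          simp only [Bool.not_eq_true] at ho hc
          cases h1 : c == '[' <;> cases h2 : c == '(' <;> cases h3 : c == '{' <;>
            cases h4 : c == ']' <;> cases h5 : c == ')' <;> cases h6 : c == '}' <;>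
            simp_all
        by_cases hs : stack.isEmpty
        · have hlen : stack.length = 0 := by
            cases stack with | nil => rfl | cons _ _ => simp [List.isEmpty] at hs
          simp only [goA, depthsB, List.zip_cons_cons, if_neg ho, if_neg hc, if_pos hs]
          rw [ih, List.filter_cons_of_pos (by
            show (stack.length == 0 &&
              !(c == '[' || c == '(' || c == '{' || c == ']' || c == ')' || c == '}')) = true
            rw [hbr, hlen]; rfl), hlen]
          simp
        · have hlen0 : (stack.length == 0) = false := by
            cases stack with | nil => simp [List.isEmpty] at hs | cons _ _ => rfl
          simp only [goA, depthsB, List.zip_cons_cons, if_neg ho, if_neg hc, if_neg hs]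
          rw [ih, List.filter_cons_of_neg (by
            show ¬(stack.length == 0 &&
              !(c == '[' || c == '(' || c == '{' || c == ']' || c == ')' || c == '}')) = true
            rw [hlen0]; exact Bool.false_ne_true)]

-- ===== VERDICT (by name: the statement is the Claim_ definition above) =====
theorem remove_brackets_deep_spec : Claim_equal_remove_brackets_deep := by
  intro text _
  unfold Spec_remove_brackets_deep remove_brackets_deep remove_brackets_deep_alt
  rw [goA_eq_filter]
  simp
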